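-- pv_equiv track=rewrite | github.com/THU-WingTecher/DeepConstr | deepconstr/gen/dtype.py | process_speical_case
-- ===== SOURCE A (Python) =====
-- def process_speical_case(record : dict) -> dict :
--     """
--     If the record is a special case, it will be processed here.
--     """
--     banned_values = ["signature", "dtype", "memory_format", "layout"]
--     idx_to_del = []
--     for i, key in enumerate(record.keys()) :
--         if key in banned_values :
--             idx_to_del.append(key)
--     for key in idx_to_del :
--         record.pop(key)
--     return record
-- ===== SOURCE B (Python) =====
-- def process_speical_case(record : dict) -> dict :
--     """
--     If the record is a special case, it will be processed here.
--     """
--     for key in ["signature", "dtype", "memory_format", "layout"]: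
--         record.pop(key, None)
--     return record
-- ===== Notes on version B (the rewrite author's own statement) =====
-- stated objective: idiomatic
-- what changed: B drops A's two-pass collect-keys-then-delete structure: it never iterates over the record's keys or builds an intermediate list, instead looping over the fixed 4-element banned list and popping each key with a default; in-place mutation of the dict is preserved.
import Mathlib
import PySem

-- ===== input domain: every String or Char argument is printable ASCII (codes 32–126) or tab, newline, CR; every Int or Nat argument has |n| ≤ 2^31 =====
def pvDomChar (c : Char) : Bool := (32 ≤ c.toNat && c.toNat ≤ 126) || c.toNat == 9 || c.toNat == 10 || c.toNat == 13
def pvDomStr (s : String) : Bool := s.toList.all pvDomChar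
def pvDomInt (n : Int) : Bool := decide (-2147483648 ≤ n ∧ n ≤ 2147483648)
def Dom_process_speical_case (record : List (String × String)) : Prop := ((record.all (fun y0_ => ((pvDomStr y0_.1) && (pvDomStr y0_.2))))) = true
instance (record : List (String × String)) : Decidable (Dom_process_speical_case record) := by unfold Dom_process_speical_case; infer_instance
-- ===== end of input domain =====

-- B removes banned keys by iterating over the fixed banned list with a defaulted pop,
-- instead of A's scan-record-keys-then-delete two-pass structure (objective: idiomatic).
-- Both Pythons mutate the dict in place and return the same object; the equivalence here
-- is about the returned association list.

-- record.pop(key): remove the (first) pair with that key; identity when absent.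
-- Exact for A under Pre_ (distinct keys make every popped key present, so no KeyError).
def pvEraseKey : List (String × String) → String → List (String × String)
  | [], _ => []
  | p :: rest, k => if p.1 = k then rest else p :: pvEraseKey rest k

def pvBanned : List String := ["signature", "dtype", "memory_format", "layout"]

-- ===== PORT A =====
def process_speical_case (record : List (String × String)) : List (String × String) :=
  let idx_to_del :=
    (PySem.List.enumerate (record.map Prod.fst) 0).foldl
      (fun acc ik => if pvBanned.contains ik.2 then acc ++ [ik.2] else acc) []
  idx_to_del.foldl pvEraseKey record

-- ===== PORT B =====
def process_speical_case_alt (record : List (String × String)) : List (String × String) :=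
  pvBanned.foldl (fun rec key => pvEraseKey rec key) record

-- ===== PRECONDITION & SPEC =====
-- Pre_ excludes association lists with duplicate keys: a Python dict cannot contain
-- duplicate keys, so such lists represent no input of the Python programs.
def Pre_process_speical_case (record : List (String × String)) : Prop :=
  (record.map Prod.fst).Nodup
instance (record : List (String × String)) : Decidable (Pre_process_speical_case record) := by
  unfold Pre_process_speical_case; infer_instance

def pvWitness_process_speical_case : (List (String × String)) :=
  [("dtype", "int32"), ("name", "x")]

def Spec_process_speical_case (record : List (String × String)) (out : List (String × String)) : Prop := out = process_speical_case_alt record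
instance (record : List (String × String)) (out : List (String × String)) : Decidable (Spec_process_speical_case record out) := by unfold Spec_process_speical_case; infer_instance

-- ===== CLAIM (what is proved, stated in full; the proofs are below) =====
def Claim_equal_process_speical_case : Prop := ∀ (record : List (String × String)), Dom_process_speical_case record → Pre_process_speical_case record → Spec_process_speical_case record (process_speical_case record)

-- ===== LEMMAS AND PROOFS =====

theorem pvEraseKey_of_nodup (l : List (String × String)) (k : String)
    (h : (l.map Prod.fst).Nodup) :
    pvEraseKey l k = l.filter (fun p => !(p.1 == k)) := by
  induction l with
  | nil => rfl
  | cons p rest ih =>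
    simp only [List.map_cons, List.nodup_cons] at h
    by_cases hk : p.1 = k
    · subst hk
      have hrest : List.filter (fun q => !q.1 == p.1) rest = rest :=
        List.filter_eq_self.mpr (fun q hq => by
          have hne : q.1 ≠ p.1 := fun e => h.1 (e ▸ List.mem_map_of_mem hq)
          simp [hne])
      simp [pvEraseKey, hrest]
    · have hb : (p.1 == k) = false := by simp [hk]
      simp [pvEraseKey, hk, hb, ih h.2]

theorem pvEraseKey_sublist (l : List (String × String)) (k : String) :
    (pvEraseKey l k).Sublist l := by
  induction l with
  | nil => simp [pvEraseKey]
  | cons p rest ih =>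
    by_cases hk : p.1 = k
    · simp [pvEraseKey, hk]
    · simpa [pvEraseKey, hk] using ih.cons₂ p

theorem pvFoldl_eraseKey (ks : List String) (l : List (String × String))
    (h : (l.map Prod.fst).Nodup) :
    ks.foldl pvEraseKey l = l.filter (fun p => !ks.contains p.1) := by
  induction ks generalizing l with
  | nil => simp
  | cons k ks ih =>
    have hsub : ((pvEraseKey l k).map Prod.fst).Nodup :=
      ((pvEraseKey_sublist l k).map Prod.fst).nodup h
    rw [List.foldl_cons, ih _ hsub, pvEraseKey_of_nodup l k h, List.filter_filter]
    apply List.filter_congr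
    intro p _
    by_cases h1 : p.1 = k <;> simp [h1]

-- A's first pass collects exactly the banned keys of the record (with multiplicity).
theorem pvCollect_eq (ks : List String) (s : Int) (acc : List String) :
    (PySem.List.enumerate ks s).foldl
      (fun acc ik => if pvBanned.contains ik.2 then acc ++ [ik.2] else acc) acc
      = acc ++ ks.filter (fun k => pvBanned.contains k) := by
  induction ks generalizing s acc with
  | nil => simp [PySem.List.enumerate_nil]
  | cons k ks ih =>
    rw [PySem.List.enumerate_cons, List.foldl_cons]
    simp only [List.contains_eq_mem, decide_eq_true_eq] at ih
    by_cases hb : k ∈ pvBanned <;> simp [hb, ih]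

-- ===== VERDICT (by name: the statement is the Claim_ definition above) =====
theorem process_speical_case_spec : Claim_equal_process_speical_case := by
  intro record _ hpre
  unfold Spec_process_speical_case process_speical_case process_speical_case_alt
  rw [pvCollect_eq, List.nil_append, pvFoldl_eraseKey _ _ hpre,
      pvFoldl_eraseKey _ _ hpre]
  apply List.filter_congr
  intro p hp
  have hmem : p.1 ∈ record.map Prod.fst := List.mem_map_of_mem hp
  by_cases h1 : pvBanned.contains p.1 = true
  · simp only [List.contains_eq_mem, List.mem_filter] at *
    simp [h1, hmem]
  · simp only [List.contains_eq_mem, List.mem_filter] at *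
    simp [h1, hmem]
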